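-- pv_equiv track=rewrite | github.com/v1docq/Test-task | json_to_html.py | parse_opening_tag
-- ===== SOURCE A (Python) =====
-- def parse_opening_tag(tag_mark):
--     result = ''
--     id = ''
--     classes = []
--     isId = False
--     isClass = False
--
--     for ch in tag_mark:
--         if ch == '#':
--             isId = True
--             isClass = False
--             continue
--         if ch == '.':
--             isClass = True
--             isId = False
--             classes.append("")
--             continue
--
--         if isId:
--             id += ch
--         elif isClass:
--             classes[-1] += ch
--         else:
--             result += ch
--     return result + ('' if len(classes) == 0 else (' class=\"' + u' '.join(classes) + "\"")) + ('' if id == '' else (" id=\"" + id + "\""))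
-- ===== SOURCE B (Python) =====
-- def _split_chunk(s):
--     for j, ch in enumerate(s):
--         if ch == '#' or ch == '.':
--             return s[:j], s[j:]
--     return s, ''
--
--
-- def parse_opening_tag(tag_mark):
--     result, rest = _split_chunk(tag_mark)
--     classes = []
--     id_parts = []
--     while rest:
--         d = rest[0]
--         body, rest = _split_chunk(rest[1:])
--         if d == '#':
--             id_parts.append(body)
--         else:
--             classes.append(body)
--     out = result
--     if classes:
--         out += ' class="' + ' '.join(classes) + '"'
--     idv = ''.join(id_parts)
--     if idv:
--         out += ' id="' + idv + '"'
--     return out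
-- ===== Notes on version B (the rewrite author's own statement) =====
-- stated objective: alternative
-- what changed: Replaced A's character-by-character state machine (mode flags isId/isClass with in-place growth of the last class) by a tokenizer: split off the delimiter-free prefix, then repeatedly cut delimiter-led chunks and classify each whole chunk as an id part or a class.
import Mathlib
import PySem

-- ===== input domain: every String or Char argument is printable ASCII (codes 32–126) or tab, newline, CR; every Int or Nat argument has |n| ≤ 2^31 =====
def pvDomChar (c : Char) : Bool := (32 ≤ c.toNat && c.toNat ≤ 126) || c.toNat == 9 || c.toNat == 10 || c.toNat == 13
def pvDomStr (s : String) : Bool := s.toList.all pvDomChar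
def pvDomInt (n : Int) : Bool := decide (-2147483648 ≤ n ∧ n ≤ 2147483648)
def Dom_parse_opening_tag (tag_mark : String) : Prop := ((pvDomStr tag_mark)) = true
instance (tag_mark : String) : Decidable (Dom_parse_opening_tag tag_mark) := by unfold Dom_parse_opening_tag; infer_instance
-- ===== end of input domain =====

-- B replaces A's per-character mode-flag state machine by a chunk tokenizer (alternative decomposition, same cost).

-- ===== PORT A =====
-- state: (result, id, classes, isId, isClass); Python strings carried as List Char
def pvStepA (st : List Char × List Char × List (List Char) × Bool × Bool) (ch : Char) :
    List Char × List Char × List (List Char) × Bool × Bool :=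
  let (res, id, cls, isId, isCl) := st
  if ch = '#' then (res, id, cls, true, false)
  else if ch = '.' then (res, id, cls ++ [[]], false, true)
  else if isId then (res, id ++ [ch], cls, isId, isCl)
  else if isCl then
    -- classes[-1] += ch : Python would raise on empty classes, but isClass is only
    -- set right after a "" was appended, so classes is never empty here
    (res, id, cls.dropLast ++ [cls.getLastD [] ++ [ch]], isId, isCl)
  else (res ++ [ch], id, cls, isId, isCl)

def parse_opening_tag (tag_mark : String) : String :=
  let (res, id, cls, _, _) := tag_mark.toList.foldl pvStepA ([], [], [], false, false)
  String.mk (res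
    ++ (if cls = [] then [] else (" class=\"".toList ++ PySem.Chars.join [' '] cls ++ ['\"']))
    ++ (if id = [] then [] else (" id=\"".toList ++ id ++ ['\"'])))

-- ===== PORT B =====
-- _split_chunk: longest delimiter-free prefix, and the rest starting at the delimiter
def pvSplitChunk : List Char → List Char × List Char
  | [] => ([], [])
  | c :: cs =>
    if c = '#' ∨ c = '.' then ([], c :: cs)
    else
      let (p, r) := pvSplitChunk cs
      (c :: p, r)

theorem pvSplitChunk_snd_length : ∀ s : List Char, (pvSplitChunk s).2.length ≤ s.length := by
  intro s
  induction s with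
  | nil => simp [pvSplitChunk]
  | cons c cs ih =>
    simp only [pvSplitChunk]
    split
    · simp
    · simpa using Nat.le_succ_of_le ih

-- the while loop: accumulate classes and id parts chunk by chunk
def pvLoopB (rest : List Char) (cls idps : List (List Char)) :
    List (List Char) × List (List Char) :=
  match rest with
  | [] => (cls, idps)
  | d :: t =>
    if d = '#' then pvLoopB (pvSplitChunk t).2 cls (idps ++ [(pvSplitChunk t).1])
    else pvLoopB (pvSplitChunk t).2 (cls ++ [(pvSplitChunk t).1]) idps
termination_by rest.length
decreasing_by
  all_goals
    have := pvSplitChunk_snd_length t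
    simp; omega

def parse_opening_tag_alt (tag_mark : String) : String :=
  let (res, rest) := pvSplitChunk tag_mark.toList
  let (cls, idps) := pvLoopB rest [] []
  let idv := PySem.Chars.join [] idps
  String.mk (res
    ++ (if cls = [] then [] else (" class=\"".toList ++ PySem.Chars.join [' '] cls ++ ['\"']))
    ++ (if idv = [] then [] else (" id=\"".toList ++ idv ++ ['\"'])))

-- ===== PRECONDITION & SPEC =====
def Spec_parse_opening_tag (tag_mark : String) (out : String) : Prop := out = parse_opening_tag_alt tag_mark
instance (tag_mark : String) (out : String) : Decidable (Spec_parse_opening_tag tag_mark out) := by unfold Spec_parse_opening_tag; infer_instance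

-- ===== CLAIM (what is proved, stated in full; the proofs are below) =====
def Claim_equal_parse_opening_tag : Prop := ∀ (tag_mark : String), Dom_parse_opening_tag tag_mark → Spec_parse_opening_tag tag_mark (parse_opening_tag tag_mark)

-- ===== LEMMAS AND PROOFS =====

def pvDelimFree (p : List Char) : Prop := ∀ c ∈ p, c ≠ '#' ∧ c ≠ '.'

theorem pvSplitChunk_decomp (s : List Char) :
    (pvSplitChunk s).1 ++ (pvSplitChunk s).2 = s := by
  induction s with
  | nil => simp [pvSplitChunk]
  | cons c cs ih =>
    simp only [pvSplitChunk]
    split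
    · simp
    · simpa using ih

theorem pvSplitChunk_fst_free (s : List Char) : pvDelimFree (pvSplitChunk s).1 := by
  induction s with
  | nil => simp [pvSplitChunk, pvDelimFree]
  | cons c cs ih =>
    simp only [pvSplitChunk]
    split
    · simp [pvDelimFree]
    · rename_i hnd
      intro x hx
      rcases (by simpa using hx) with h | h
      · subst h; exact ⟨fun h => hnd (Or.inl h), fun h => hnd (Or.inr h)⟩
      · exact ih x h

theorem pvSplitChunk_snd_head (s : List Char) :
    (pvSplitChunk s).2 = [] ∨ ∃ t, (pvSplitChunk s).2 = '#' :: t ∨ (pvSplitChunk s).2 = '.' :: t := by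
  induction s with
  | nil => simp [pvSplitChunk]
  | cons c cs ih =>
    simp only [pvSplitChunk]
    split
    · rename_i hd
      rcases hd with h | h
      · subst h; exact Or.inr ⟨cs, Or.inl rfl⟩
      · subst h; exact Or.inr ⟨cs, Or.inr rfl⟩
    · simpa using ih

-- A's fold over a delimiter-free chunk in "result" mode
theorem pvFoldA_none (p : List Char) (hp : pvDelimFree p) (res id : List Char)
    (cls : List (List Char)) :
    p.foldl pvStepA (res, id, cls, false, false) = (res ++ p, id, cls, false, false) := by
  induction p generalizing res with
  | nil => simp
  | cons c cs ih =>
    obtain ⟨h1, h2⟩ := hp c (by simp)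
    simp only [List.foldl_cons, pvStepA, if_neg h1, if_neg h2, Bool.false_eq_true, if_false]
    rw [ih (fun x hx => hp x (by simp [hx]))]
    simp

-- A's fold over a delimiter-free chunk in id mode
theorem pvFoldA_id (p : List Char) (hp : pvDelimFree p) (res id : List Char)
    (cls : List (List Char)) :
    p.foldl pvStepA (res, id, cls, true, false) = (res, id ++ p, cls, true, false) := by
  induction p generalizing id with
  | nil => simp
  | cons c cs ih =>
    obtain ⟨h1, h2⟩ := hp c (by simp)
    simp only [List.foldl_cons, pvStepA, if_neg h1, if_neg h2, if_true]
    rw [ih (fun x hx => hp x (by simp [hx]))]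
    simp

-- A's fold over a delimiter-free chunk in class mode grows the last class
theorem pvFoldA_class (p : List Char) (hp : pvDelimFree p) (res id : List Char)
    (cls0 : List (List Char)) (l : List Char) :
    p.foldl pvStepA (res, id, cls0 ++ [l], false, true) = (res, id, cls0 ++ [l ++ p], false, true) := by
  induction p generalizing l with
  | nil => simp
  | cons c cs ih =>
    obtain ⟨h1, h2⟩ := hp c (by simp)
    simp only [List.foldl_cons, pvStepA, if_neg h1, if_neg h2, Bool.false_eq_true, if_false,
      if_true, List.dropLast_concat, List.getLastD_concat]
    rw [ih (fun x hx => hp x (by simp [hx]))]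
    simp

-- loopB is an accumulator homomorphism
theorem pvLoopB_acc_aux (n : Nat) : ∀ rest : List Char, rest.length ≤ n →
    ∀ cls idps : List (List Char),
    pvLoopB rest cls idps = (cls ++ (pvLoopB rest [] []).1, idps ++ (pvLoopB rest [] []).2) := by
  induction n with
  | zero =>
    intro rest h cls idps
    have : rest = [] := List.length_eq_zero_iff.mp (Nat.le_zero.mp h)
    subst this; simp [pvLoopB]
  | succ n ih =>
    intro rest h cls idps
    match rest with
    | [] => simp [pvLoopB]
    | d :: t =>
      have hlen : (pvSplitChunk t).2.length ≤ n := by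
        have := pvSplitChunk_snd_length t
        simp at h; omega
      by_cases hd : d = '#'
      · rw [pvLoopB, if_pos hd, pvLoopB, if_pos hd,
          ih _ hlen cls (idps ++ [(pvSplitChunk t).1]),
          ih _ hlen [] ([] ++ [(pvSplitChunk t).1])]
        simp
      · rw [pvLoopB, if_neg hd, pvLoopB, if_neg hd,
          ih _ hlen (cls ++ [(pvSplitChunk t).1]) idps,
          ih _ hlen ([] ++ [(pvSplitChunk t).1]) []]
        simp

theorem pvLoopB_acc (rest : List Char) (cls idps : List (List Char)) :
    pvLoopB rest cls idps = (cls ++ (pvLoopB rest [] []).1, idps ++ (pvLoopB rest [] []).2) :=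
  pvLoopB_acc_aux rest.length rest le_rfl cls idps

theorem pvJoinNil (l : List (List Char)) : PySem.Chars.join [] l = l.flatten := by
  induction l with
  | nil => simp [PySem.Chars.join, List.intercalate]
  | cons x xs ih =>
    cases xs with
    | nil => simp [PySem.Chars.join, List.intercalate]
    | cons y ys => rw [PySem.Chars.join_cons_cons, ih]; simp

-- main invariant: from a chunk boundary, A's fold produces exactly B's tokenization
theorem pvMain (n : Nat) : ∀ rest : List Char, rest.length ≤ n →
    (rest = [] ∨ ∃ t, rest = '#' :: t ∨ rest = '.' :: t) →
    ∀ (res id : List Char) (cls : List (List Char)) (b1 b2 : Bool),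
    (rest.foldl pvStepA (res, id, cls, b1, b2)).1 = res ∧
    (rest.foldl pvStepA (res, id, cls, b1, b2)).2.1 = id ++ PySem.Chars.join [] (pvLoopB rest [] []).2 ∧
    (rest.foldl pvStepA (res, id, cls, b1, b2)).2.2.1 = cls ++ (pvLoopB rest [] []).1 := by
  induction n with
  | zero =>
    intro rest h _ res id cls b1 b2
    have : rest = [] := List.length_eq_zero_iff.mp (Nat.le_zero.mp h)
    subst this; simp [pvLoopB, PySem.Chars.join, List.intercalate]
  | succ n ih =>
    intro rest h hhead res id cls b1 b2
    rcases hhead with rfl | ⟨t, ht⟩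
    · simp [pvLoopB, PySem.Chars.join, List.intercalate]
    · have hlen : (pvSplitChunk t).2.length ≤ n := by
        have := pvSplitChunk_snd_length t
        rcases ht with rfl | rfl <;> simp at h <;> omega
      have hfree := pvSplitChunk_fst_free t
      have hdec := pvSplitChunk_decomp t
      have hih := ih (pvSplitChunk t).2 hlen (pvSplitChunk_snd_head t)
      rcases ht with rfl | rfl
      · -- '#' chunk
        have hstep : pvStepA (res, id, cls, b1, b2) '#' = (res, id, cls, true, false) := by
          simp [pvStepA]
        have hfoldt : t.foldl pvStepA (res, id, cls, true, false) =
            (pvSplitChunk t).2.foldl pvStepA (res, id ++ (pvSplitChunk t).1, cls, true, false) := by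
          conv_lhs => rw [← hdec]
          rw [List.foldl_append, pvFoldA_id _ hfree]
        rw [List.foldl_cons, hstep, hfoldt]
        obtain ⟨h1, h2, h3⟩ := hih res (id ++ (pvSplitChunk t).1) cls true false
        refine ⟨h1, ?_, ?_⟩
        · rw [h2, pvLoopB, if_pos rfl, pvLoopB_acc _ [] ([] ++ [(pvSplitChunk t).1])]
          simp [pvJoinNil]
        · rw [h3, pvLoopB, if_pos rfl, pvLoopB_acc _ [] ([] ++ [(pvSplitChunk t).1])]
          simp
      · -- '.' chunk
        have hstep : pvStepA (res, id, cls, b1, b2) '.' = (res, id, cls ++ [[]], false, true) := by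
          simp [pvStepA]
        have hfoldt : t.foldl pvStepA (res, id, cls ++ [[]], false, true) =
            (pvSplitChunk t).2.foldl pvStepA (res, id, cls ++ [[] ++ (pvSplitChunk t).1], false, true) := by
          conv_lhs => rw [← hdec]
          rw [List.foldl_append, pvFoldA_class _ hfree res id cls []]
        rw [List.foldl_cons, hstep, hfoldt]
        obtain ⟨h1, h2, h3⟩ := hih res id (cls ++ [[] ++ (pvSplitChunk t).1]) false true
        refine ⟨h1, ?_, ?_⟩
        · rw [h2, pvLoopB, if_neg (by decide), pvLoopB_acc _ ([] ++ [(pvSplitChunk t).1]) []]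
          simp
        · rw [h3, pvLoopB, if_neg (by decide), pvLoopB_acc _ ([] ++ [(pvSplitChunk t).1]) []]
          simp

-- ===== VERDICT (by name: the statement is the Claim_ definition above) =====
theorem parse_opening_tag_spec : Claim_equal_parse_opening_tag := by
  intro tag_mark _
  unfold Spec_parse_opening_tag parse_opening_tag parse_opening_tag_alt
  have hdec := pvSplitChunk_decomp tag_mark.toList
  have hfree := pvSplitChunk_fst_free tag_mark.toList
  have hmain := pvMain (pvSplitChunk tag_mark.toList).2.length _ le_rfl
    (pvSplitChunk_snd_head tag_mark.toList) (pvSplitChunk tag_mark.toList).1 [] [] false false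
  obtain ⟨h1, h2, h3⟩ := hmain
  have hfold : tag_mark.toList.foldl pvStepA ([], [], [], false, false) =
      (pvSplitChunk tag_mark.toList).2.foldl pvStepA ((pvSplitChunk tag_mark.toList).1, [], [], false, false) := by
    conv_lhs => rw [← hdec]
    rw [List.foldl_append, pvFoldA_none _ hfree [] [] []]
    simp
  rcases hst : (pvSplitChunk tag_mark.toList).2.foldl pvStepA
      ((pvSplitChunk tag_mark.toList).1, [], [], false, false) with ⟨a, b, c, f1, f2⟩
  rw [hst] at h1 h2 h3
  simp only at h1 h2 h3
  rw [hfold, hst, h1, h2, h3]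
  simp
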